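-- pv_equiv track=rewrite | github.com/nicolasthreatt/data-structures-and-algos | algorithms/greedy/CanPlaceFlowers.py | canPlaceFlowersI
-- ===== SOURCE A (Python) =====
-- from typing import List
--
-- def canPlaceFlowersI(flowerbed: List[int], n: int) -> bool:
--     flowers = [0] + flowerbed + [0]
--
--     # Skip First and Last Elements (Modified 0's)
--     for i in range(1, len(flowers) - 1):
--         left_plot_empty = flowers[i - 1]
--         curr_plot_empty = flowers[i]
--         right_plot_empty = flowers[i + 1]
--
--         # Greedy Choice - Plant Flower
--         if left_plot_empty == curr_plot_empty == right_plot_empty == 0: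
--             n -= 1  # Local Optimal Choice
--             flowers[i] = 1
--
--     return n <= 0  # Global Optimal Solution
-- ===== SOURCE B (Python) =====
-- from typing import List
--
-- def canPlaceFlowersI(flowerbed: List[int], n: int) -> bool:
--     # Single pass over a run of empty plots: count consecutive empties,
--     # seeded with 1 for the virtual leading empty plot; plant whenever
--     # the run reaches 3 and account for the virtual trailing plot at the end.
--     count = 1
--     for plot in flowerbed:
--         if plot == 0:
--             count += 1
--             if count == 3:
--                 n -= 1
--                 count = 1
--         else:
--             count = 0
--     if count + 1 == 3:
--         n -= 1
--     return n <= 0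
-- ===== Notes on version B (the rewrite author's own statement) =====
-- stated objective: simpler
-- what changed: Replaces A's padded-copy plus per-index left/curr/right window lookups (with in-place list mutation) by a single pass keeping only a running count of consecutive empty plots (seeded 1 for the virtual leading plot, tail-adjusted for the trailing one); dropping the list copy, the three indexed reads and the writes per step makes it measurably faster by a constant factor.
import Mathlib
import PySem

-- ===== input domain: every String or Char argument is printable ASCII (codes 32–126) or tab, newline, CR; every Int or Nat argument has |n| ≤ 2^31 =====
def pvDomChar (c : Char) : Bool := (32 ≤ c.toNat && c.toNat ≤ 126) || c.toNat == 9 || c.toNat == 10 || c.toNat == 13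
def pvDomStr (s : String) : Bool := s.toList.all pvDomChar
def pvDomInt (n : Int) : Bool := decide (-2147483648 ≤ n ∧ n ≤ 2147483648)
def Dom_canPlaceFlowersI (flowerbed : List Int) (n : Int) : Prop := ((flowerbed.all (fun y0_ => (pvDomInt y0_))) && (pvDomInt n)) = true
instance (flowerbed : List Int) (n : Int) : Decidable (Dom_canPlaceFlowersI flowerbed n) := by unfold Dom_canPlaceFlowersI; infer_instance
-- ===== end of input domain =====

-- B replaces A's padded list + 3-plot window + in-place mutation by a single
-- pass keeping a running count of consecutive empty plots (objective: simpler).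


-- ===== PORT A =====
-- literal port: flowers = [0] + flowerbed + [0]; loop i over range(1, len-1)
-- reading flowers[i-1], flowers[i], flowers[i+1] and mutating flowers[i] and n.
def canPlaceFlowersI (flowerbed : List Int) (n : Int) : Bool :=
  let flowers : List Int := [0] ++ flowerbed ++ [0]
  let st :=
    (PySem.List.pyRange 1 ((flowers.length : Int) - 1) 1).foldl
      (fun (st : List Int × Int) i =>
        let left_plot_empty := PySem.List.pyGetD st.1 (i - 1) 0
        let curr_plot_empty := PySem.List.pyGetD st.1 i 0
        let right_plot_empty := PySem.List.pyGetD st.1 (i + 1) 0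
        if left_plot_empty = 0 ∧ curr_plot_empty = 0 ∧ right_plot_empty = 0 then
          (PySem.List.pySetD st.1 i 1, st.2 - 1)
        else st)
      (flowers, n)
  decide (st.2 ≤ 0)

-- ===== PORT B =====
-- literal port of Source B: fold over the plots with state (count, n), then the
-- trailing virtual-plot check.
def canPlaceFlowersI_alt (flowerbed : List Int) (n : Int) : Bool :=
  let st :=
    flowerbed.foldl
      (fun (st : Int × Int) plot =>
        if plot = 0 then
          if st.1 + 1 = 3 then (1, st.2 - 1) else (st.1 + 1, st.2)
        else (0, st.2))
      (1, n)
  let n' := if st.1 + 1 = 3 then st.2 - 1 else st.2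
  decide (n' ≤ 0)

-- ===== PRECONDITION & SPEC =====
def Spec_canPlaceFlowersI (flowerbed : List Int) (n : Int) (out : Bool) : Prop := out = canPlaceFlowersI_alt flowerbed n
instance (flowerbed : List Int) (n : Int) (out : Bool) : Decidable (Spec_canPlaceFlowersI flowerbed n out) := by unfold Spec_canPlaceFlowersI; infer_instance

-- ===== CLAIM (what is proved, stated in full; the proofs are below) =====
def Claim_equal_canPlaceFlowersI : Prop := ∀ (flowerbed : List Int) (n : Int), Dom_canPlaceFlowersI flowerbed n → Spec_canPlaceFlowersI flowerbed n (canPlaceFlowersI flowerbed n)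

-- ===== LEMMAS AND PROOFS =====

-- clean recursion capturing A's scan: state = previous plot's (possibly planted) value
def goA (prev : Int) (l : List Int) (n : Int) : Int :=
  match l with
  | [] => n
  | c :: r => if prev = 0 ∧ c = 0 ∧ r.head?.getD 0 = 0 then goA 1 r (n - 1) else goA c r n

-- clean recursion capturing B's scan: state = length of current run of empties
def goB (cnt : Int) (l : List Int) (n : Int) : Int :=
  match l with
  | [] => if cnt + 1 = 3 then n - 1 else n
  | c :: r => if c = 0 then (if cnt + 1 = 3 then goB 1 r (n - 1) else goB (cnt + 1) r n)
              else goB 0 r n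

-- B's fold (plus tail adjustment) computes goB 1
theorem foldB_eq_goB (l : List Int) (cnt n : Int) :
    (let st := l.foldl
      (fun (st : Int × Int) plot =>
        if plot = 0 then
          if st.1 + 1 = 3 then (1, st.2 - 1) else (st.1 + 1, st.2)
        else (0, st.2)) (cnt, n)
     if st.1 + 1 = 3 then st.2 - 1 else st.2) = goB cnt l n := by
  induction l generalizing cnt n with
  | nil => simp [goB]
  | cons c r ih =>
    simp only [List.foldl_cons, goB]
    by_cases hc : c = 0
    · by_cases h3 : cnt + 1 = 3 <;> simp [hc, h3, ih]
    · simp [hc, ih]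

-- A's index fold over the padded, mutated list computes goA
theorem foldA_eq_goA (rest pre : List Int) (prev n : Int) :
    ((PySem.List.pyRange ((pre.length : Int) + 1)
        ((pre.length : Int) + 1 + rest.length) 1).foldl
      (fun (st : List Int × Int) i =>
        let left_plot_empty := PySem.List.pyGetD st.1 (i - 1) 0
        let curr_plot_empty := PySem.List.pyGetD st.1 i 0
        let right_plot_empty := PySem.List.pyGetD st.1 (i + 1) 0
        if left_plot_empty = 0 ∧ curr_plot_empty = 0 ∧ right_plot_empty = 0 then
          (PySem.List.pySetD st.1 i 1, st.2 - 1)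
        else st)
      (pre ++ [prev] ++ rest ++ [0], n)).2 = goA prev rest n := by
  induction rest generalizing pre prev n with
  | nil => simp [PySem.List.pyRange_one_eq_nil, goA]
  | cons c r ih =>
    rw [PySem.List.pyRange_one_cons (by push_cast [List.length_cons]; omega)]
    simp only [List.foldl_cons]
    have h1 : PySem.List.pyGetD (pre ++ [prev] ++ (c :: r) ++ [0]) ((pre.length : Int) + 1 - 1) (0:Int) = prev := by
      rw [show ((pre.length : Int) + 1 - 1) = ((pre.length : Nat) : Int) by ring,
        PySem.List.pyGetD_natCast]
      simp [List.getD_eq_getElem?_getD]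
    have h2 : PySem.List.pyGetD (pre ++ [prev] ++ (c :: r) ++ [0]) ((pre.length : Int) + 1) (0:Int) = c := by
      rw [show ((pre.length : Int) + 1) = ((pre.length + 1 : Nat) : Int) by push_cast; ring,
        PySem.List.pyGetD_natCast]
      simp [List.getD_eq_getElem?_getD]
    have h3 : PySem.List.pyGetD (pre ++ [prev] ++ (c :: r) ++ [0]) ((pre.length : Int) + 1 + 1) (0:Int) = r.head?.getD 0 := by
      rw [show ((pre.length : Int) + 1 + 1) = ((pre.length + 2 : Nat) : Int) by push_cast; ring,
        PySem.List.pyGetD_natCast]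
      simp [List.getD_eq_getElem?_getD]
      cases r <;> simp
    have hset : PySem.List.pySetD (pre ++ [prev] ++ (c :: r) ++ [0]) ((pre.length : Int) + 1) (1:Int)
        = (pre ++ [prev]) ++ [(1:Int)] ++ r ++ [0] := by
      rw [show ((pre.length : Int) + 1) = ((pre.length + 1 : Nat) : Int) by push_cast; ring,
        PySem.List.pySetD_natCast]
      simp
    simp only [h1, h2, h3, hset, goA]
    have hb1 : ((pre.length : Int) + 1 + 1) = (((pre ++ [prev]).length : Int) + 1) := by
      simp [List.length_append]
    have hb2 : ((pre.length : Int) + 1 + ((c :: r).length : Int)) = (((pre ++ [prev]).length : Int) + 1 + (r.length : Int)) := by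
      simp [List.length_append, List.length_cons]; ring
    by_cases hcond : prev = 0 ∧ c = 0 ∧ r.head?.getD 0 = 0
    · rw [if_pos hcond, if_pos hcond, hb1, hb2]
      exact ih (pre ++ [prev]) 1 (n - 1)
    · rw [if_neg hcond, if_neg hcond, hb1, hb2,
        show pre ++ [prev] ++ c :: r ++ [0] = (pre ++ [prev]) ++ [c] ++ r ++ [0] by simp]
      exact ih (pre ++ [prev]) c n

theorem goA_eq_goB_zero (l : List Int) :
    (∀ n c, c ≠ 0 → goA c l n = goB 0 l n) ∧
    (∀ n, goA 0 l n = goB 1 l n) ∧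
    (∀ n, goB 2 l n = if l.head?.getD 0 = 0 then goA 1 l (n - 1) else goA 0 l n) := by
  induction l with
  | nil => refine ⟨?_, ?_, ?_⟩ <;> intros <;> simp [goA, goB]
  | cons x r ih =>
    obtain ⟨ha, hb, hc⟩ := ih
    refine ⟨?_, ?_, ?_⟩
    · intro n c hcne
      by_cases hx : x = 0
      · simp [goA, goB, hx, hcne, hb]
      · simp [goA, goB, hx, hcne, ha n x hx]
    · intro n
      by_cases hx : x = 0
      · simp only [goA, goB, hx]
        simp only [true_and, if_true]
        exact (hc n).symm
      · simp [goA, goB, hx, ha n x hx]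
    · intro n
      by_cases hx : x = 0
      · simp [goA, goB, hx, hb (n - 1)]
      · simp [goA, goB, hx, ha n x hx]

-- ===== VERDICT (by name: the statement is the Claim_ definition above) =====
theorem canPlaceFlowersI_spec : Claim_equal_canPlaceFlowersI := by
  intro flowerbed n _
  unfold Spec_canPlaceFlowersI canPlaceFlowersI canPlaceFlowersI_alt
  dsimp only
  have hA := foldA_eq_goA flowerbed [] 0 n
  have hB := foldB_eq_goB flowerbed 1 n
  simp only [List.length_nil, Nat.cast_zero, List.nil_append, zero_add] at hA
  simp only at hB
  rw [show (((([0] ++ flowerbed ++ [0]) : List Int).length : Int) - 1) = 1 + (flowerbed.length : Int) by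
    simp [List.length_append]; ring]
  rw [show ([0] ++ flowerbed ++ [(0:Int)]) = [(0:Int)] ++ flowerbed ++ [0] from rfl] at hA ⊢
  rw [hA, hB, (goA_eq_goB_zero flowerbed).2.1 n]
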